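-- pv_equiv track=rewrite | github.com/IvanovskyOrtega/project-euler-solutions | solutions/011_largest_product_in_a_grid.py | find_greatest_product_in_diags_l2r
-- ===== SOURCE A (Python) =====
-- from typing import List
--
-- def find_greatest_product_in_diags_l2r(grid: List[List[int]], n: int) -> int:
--     """find_greatest_product_in_diags_12r.
--
--     Find the greatest product of `n` consecutive numbers in the diagonals from
--     left to right of a given grid.
--
--     Arguments
--     ----------
--     grid : List[List[int]]
--         The grid of numbers.
--     n : int
--         The amount of consecutive numbers to find its product.
--
--     Returns
--     -------
--     int : The maximum product for the grid rows.
--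
--     Examples
--     --------
--     >>> find_greatest_product_in_rows([[1,2,3], [2,3,4]],2,)
--     8
--     """
--     max_prod = 0
--     i = 0
--     grid_size = len(grid)
--     j = grid_size - 1
--     while i < grid_size:
--         while j >= 0:
--             numbers = []
--             k = 0
--             while ((j + k) < grid_size) and ((i + k) < grid_size):
--                 numbers.append(grid[i + k][j + k])
--                 k += 1
--                 if k < n:
--                     continue
--                 current_prod = 1
--                 for num in numbers:
--                     if num == 0:
--                         current_prod = 0
--                         break
--                     current_prod *= num
--                 max_prod = max(max_prod, current_prod)
--                 numbers.pop(0)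
--             if k < n:
--                 j -= 1
--                 continue
--             if j == 0:
--                 break
--             j -= 1
--         i += 1
--     return max_prod
-- ===== SOURCE B (Python) =====
-- def find_greatest_product_in_diags_l2r(grid, n):
--     """Sliding-window product with a running zero count over each down-right
--     diagonal, instead of recomputing every window's product from scratch."""
--     size = len(grid)
--     best = 0
--     starts = [(0, j) for j in range(size - 1, -1, -1)] + [(i, 0) for i in range(1, size)]
--     for (si, sj) in starts:
--         length = size - max(si, sj)
--         prod = 1
--         zeros = 0
--         for idx in range(length):
--             v = grid[si + idx][sj + idx]
--             if v == 0:
--                 zeros += 1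
--             else:
--                 prod *= v
--             if idx >= n:
--                 u = grid[si + idx - n][sj + idx - n]
--                 if u == 0:
--                     zeros -= 1
--                 else:
--                     prod //= u
--             if idx >= n - 1:
--                 best = max(best, 0 if zeros > 0 else prod)
--     return best
-- ===== Notes on version B (the rewrite author's own statement) =====
-- stated objective: alternative
-- what changed: Instead of A's triple-nested while loops that rebuild a window queue and recompute each window's product element by element, B enumerates the diagonal start cells explicitly and slides a window over each diagonal, maintaining a running product of the nonzero entries and a zero count, so it has no inner per-window loop (O(g^2) arithmetic operations vs A's O(g^2*n); not measurably faster in Python at the sampled window sizes).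
-- outside the precondition, e.g. on find_greatest_product_in_diags_l2r([[2, 3], [4, 5]], 0): A returns 5, B returns 1; on find_greatest_product_in_diags_l2r([[2, 3], [4, 5]], -1): A returns 5, B raises IndexError
import Mathlib
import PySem

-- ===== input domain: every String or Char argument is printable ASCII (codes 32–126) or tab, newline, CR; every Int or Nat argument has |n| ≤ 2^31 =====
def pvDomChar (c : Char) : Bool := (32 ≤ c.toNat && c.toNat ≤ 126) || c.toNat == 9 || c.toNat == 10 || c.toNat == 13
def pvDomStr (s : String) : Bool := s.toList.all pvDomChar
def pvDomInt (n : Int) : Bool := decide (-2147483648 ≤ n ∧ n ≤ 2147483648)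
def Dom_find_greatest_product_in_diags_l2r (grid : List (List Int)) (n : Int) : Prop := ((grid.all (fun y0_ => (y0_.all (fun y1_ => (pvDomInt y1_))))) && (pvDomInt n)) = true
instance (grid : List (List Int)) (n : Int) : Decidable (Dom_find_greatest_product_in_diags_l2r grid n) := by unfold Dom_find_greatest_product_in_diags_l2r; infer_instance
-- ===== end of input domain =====

-- B replaces A's per-window product recomputation by a sliding-window product with a
-- running zero count over each down-right diagonal (same return values, proved below).

-- ===== PORT A =====
-- current_prod loop: 'for num in numbers: if num == 0: … break; current_prod *= num'
def pvAProd : List Int → Int → Int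
  | [], p => p
  | x :: xs, p => if x = 0 then 0 else pvAProd xs (p * x)

def pvAKloop (grid : List (List Int)) (size n i j k : Int) (numbers : List Int) (maxp : Int) : Int × Int :=
  if h : j + k < size ∧ i + k < size then
    let numbers' := numbers ++ [PySem.List.pyGetD (PySem.List.pyGetD grid (i + k) []) (j + k) 0]
    if k + 1 < n then pvAKloop grid size n i j (k + 1) numbers' maxp
    else pvAKloop grid size n i j (k + 1) (numbers'.drop 1) (max maxp (pvAProd numbers' 1))
  else (maxp, k)
termination_by (size - i - k).toNat
decreasing_by all_goals omega

def pvAJloop (grid : List (List Int)) (size n i j maxp : Int) : Int × Int :=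
  if h : j ≥ 0 then
    let r := pvAKloop grid size n i j 0 [] maxp
    if r.2 < n then pvAJloop grid size n i (j - 1) r.1
    else if j = 0 then (j, r.1)
    else pvAJloop grid size n i (j - 1) r.1
  else (j, maxp)
termination_by (j + 1).toNat
decreasing_by all_goals omega

def pvAIloop (grid : List (List Int)) (size n i j maxp : Int) : Int :=
  if h : i < size then
    let r := pvAJloop grid size n i j maxp
    pvAIloop grid size n (i + 1) r.1 r.2
  else maxp
termination_by (size - i).toNat
decreasing_by all_goals omega

def find_greatest_product_in_diags_l2r (grid : List (List Int)) (n : Int) : Int :=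
  pvAIloop grid (PySem.List.len grid) n 0 (PySem.List.len grid - 1) 0

-- ===== PORT B =====
def pvBBody (grid : List (List Int)) (n si sj : Int) (st : Int × Int × Int) (idx : Int) : Int × Int × Int :=
  let v := PySem.List.pyGetD (PySem.List.pyGetD grid (si + idx) []) (sj + idx) 0
  let pz1 : Int × Int := if v = 0 then (st.1, st.2.1 + 1) else (st.1 * v, st.2.1)
  let pz2 : Int × Int :=
    if n ≤ idx then
      let u := PySem.List.pyGetD (PySem.List.pyGetD grid (si + idx - n) []) (sj + idx - n) 0
      if u = 0 then (pz1.1, pz1.2 - 1) else (PySem.Int.floordiv pz1.1 u, pz1.2)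
    else pz1
  let best := if n - 1 ≤ idx then max st.2.2 (if 0 < pz2.2 then 0 else pz2.1) else st.2.2
  (pz2.1, pz2.2, best)

def find_greatest_product_in_diags_l2r_alt (grid : List (List Int)) (n : Int) : Int :=
  let size := PySem.List.len grid
  let starts := ((PySem.List.pyRange (size - 1) (-1) (-1)).map (fun j => ((0 : Int), j)))
             ++ ((PySem.List.pyRange 1 size 1).map (fun i => (i, (0 : Int))))
  starts.foldl (fun best s =>
    ((PySem.List.pyRange 0 (size - max s.1 s.2) 1).foldl (pvBBody grid n s.1 s.2) (1, 0, best)).2.2) 0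

-- ===== PRECONDITION & SPEC =====
-- Pre_ excludes (a) grids with a row shorter than the number of rows, on which A raises
-- IndexError, and (b) n <= 0, a degenerate window size for which 'n consecutive numbers' is
-- unspecified: A happens to behave like n = 1 there while B raises (n < 0) or yields the
-- empty-window product (n = 0).
def Pre_find_greatest_product_in_diags_l2r (grid : List (List Int)) (n : Int) : Prop :=
  1 ≤ n ∧ ∀ row ∈ grid, grid.length ≤ row.length
instance (grid : List (List Int)) (n : Int) : Decidable (Pre_find_greatest_product_in_diags_l2r grid n) := by unfold Pre_find_greatest_product_in_diags_l2r; infer_instance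
def pvWitness_find_greatest_product_in_diags_l2r : List (List Int) × Int := ([[1, 2], [3, 4]], 2)
def Spec_find_greatest_product_in_diags_l2r (grid : List (List Int)) (n : Int) (out : Int) : Prop := out = find_greatest_product_in_diags_l2r_alt grid n
instance (grid : List (List Int)) (n : Int) (out : Int) : Decidable (Spec_find_greatest_product_in_diags_l2r grid n out) := by unfold Spec_find_greatest_product_in_diags_l2r; infer_instance

-- ===== CLAIM (what is proved, stated in full; the proofs are below) =====
def Claim_equal_find_greatest_product_in_diags_l2r : Prop := ∀ (grid : List (List Int)) (n : Int), Dom_find_greatest_product_in_diags_l2r grid n → Pre_find_greatest_product_in_diags_l2r grid n → Spec_find_greatest_product_in_diags_l2r grid n (find_greatest_product_in_diags_l2r grid n)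

-- ===== LEMMAS AND PROOFS =====
def pvDEnt (grid : List (List Int)) (si sj : Int) (t : Nat) : Int :=
  PySem.List.pyGetD (PySem.List.pyGetD grid (si + t) []) (sj + t) 0

def pvDList (grid : List (List Int)) (si sj : Int) (L : Nat) : List Int :=
  (List.range L).map (pvDEnt grid si sj)

def pvWinProd (w : List Int) : Int := if 0 ∈ w then 0 else w.prod

def pvWinStep (d : List Int) (N : Nat) (b : Int) (e : Nat) : Int :=
  max b (pvWinProd ((d.take e).drop (e - N)))

def pvWinMax (d : List Int) (N : Nat) (b : Int) : Int :=
  ((List.range' 1 d.length).filter (fun e => N ≤ e)).foldl (pvWinStep d N) b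

def pvDiagMax (grid : List (List Int)) (N : Nat) (size si sj : Int) (b : Int) : Int :=
  pvWinMax (pvDList grid si sj ((size - max si sj).toNat)) N b

theorem pvWinMax_small (d : List Int) (N : Nat) (b : Int) (h : d.length < N) :
    pvWinMax d N b = b := by
  unfold pvWinMax
  rw [List.filter_eq_nil_iff.mpr, List.foldl_nil]
  intro e he
  have := List.mem_range'_1.mp he
  simp only [decide_eq_true_eq]
  omega

theorem pvDList_getElem (grid : List (List Int)) (si sj : Int) (L kn : Nat) (h : kn < L) :
    (pvDList grid si sj L)[kn]'(by simp [pvDList]; omega) = pvDEnt grid si sj kn := by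
  simp [pvDList]

theorem pvTakeSucc (l : List Int) (kn : Nat) (h : kn < l.length) :
    l.take kn ++ [l[kn]] = l.take (kn + 1) := by
  rw [List.take_add_one, List.getElem?_eq_getElem h]
  simp

theorem pvAProd_eq (w : List Int) (p : Int) :
    pvAProd w p = if 0 ∈ w then 0 else p * w.prod := by
  induction w generalizing p with
  | nil => simp [pvAProd]
  | cons x xs ih =>
    simp only [pvAProd, ih, List.mem_cons, List.prod_cons]
    by_cases hx : x = 0 <;> by_cases h0 : 0 ∈ xs <;>
      simp [hx, h0, mul_assoc, eq_comm (a := (0 : Int)) (b := x)]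

theorem pvAKloop_eq (grid : List (List Int)) (size n i j : Int) (N L : Nat)
    (hn : (N : Int) = n) (hN : 1 ≤ N)
    (hL : (L : Int) = size - max i j) (hij : 0 ≤ i ∧ 0 ≤ j)
    (kn : Nat) (maxp : Int) (hkn : kn ≤ L) :
    pvAKloop grid size n i j kn (((pvDList grid i j L).take kn).drop (kn + 1 - N)) maxp
      = (((List.range' (kn + 1) (L - kn)).filter (fun e => N ≤ e)).foldl
           (pvWinStep (pvDList grid i j L) N) maxp, (L : Int)) := by
  obtain ⟨hi, hj⟩ := hij
  induction hfuel : L - kn generalizing kn maxp with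
  | zero =>
    have hkL : kn = L := by omega
    rw [pvAKloop, dif_neg (by subst hkL; omega)]
    simp [hkL]
  | succ fuel ih =>
    have hklt : kn < L := by omega
    have hlen : (pvDList grid i j L).length = L := by simp [pvDList]
    rw [pvAKloop, dif_pos (by omega)]
    have hent : PySem.List.pyGetD (PySem.List.pyGetD grid (i + (kn : Int)) []) (j + (kn : Int)) 0
        = (pvDList grid i j L)[kn]'(by omega) := by
      rw [pvDList_getElem _ _ _ _ _ hklt]; rfl
    rw [hent]
    have happ : ((pvDList grid i j L).take kn).drop (kn + 1 - N) ++ [(pvDList grid i j L)[kn]'(by omega)]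
        = ((pvDList grid i j L).take (kn + 1)).drop (kn + 1 - N) := by
      rw [← pvTakeSucc _ _ (by omega), List.drop_append_of_le_length (by simp; omega)]
    rw [happ]
    have hrange : List.range' (kn + 1) (fuel + 1) = (kn + 1) :: List.range' (kn + 1 + 1) fuel := by
      simpa using List.range'_succ (s := kn + 1) (n := fuel)
    by_cases hb : (kn : Int) + 1 < n
    · rw [if_pos hb]
      have hlt : kn + 1 < N := by omega
      have hdrop : ((pvDList grid i j L).take (kn + 1)).drop (kn + 1 - N)
          = ((pvDList grid i j L).take (kn + 1)).drop (kn + 1 + 1 - N) := by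
        congr 1; omega
      have hcast : (kn : Int) + 1 = ((kn + 1 : Nat) : Int) := by push_cast; ring
      rw [hdrop, hcast, ih (kn + 1) maxp (by omega) (by omega)]
      rw [hrange, List.filter_cons_of_neg (by simp; omega)]
    · rw [if_neg hb]
      have hge : N ≤ kn + 1 := by omega
      have hdrop : (((pvDList grid i j L).take (kn + 1)).drop (kn + 1 - N)).drop 1
          = ((pvDList grid i j L).take (kn + 1)).drop (kn + 1 + 1 - N) := by
        rw [List.drop_drop]; congr 1; omega
      have hcast : (kn : Int) + 1 = ((kn + 1 : Nat) : Int) := by push_cast; ring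
      rw [hdrop, hcast, ih (kn + 1) _ (by omega) (by omega)]
      rw [hrange, List.filter_cons_of_pos (by simp; omega), List.foldl_cons]
      congr 2
      simp [pvAProd_eq, pvWinStep, pvWinProd]

theorem pvAKloop_full (grid : List (List Int)) (size n i j : Int) (N : Nat)
    (hn : (N : Int) = n) (hN : 1 ≤ N) (hi : 0 ≤ i) (hj : 0 ≤ j) (hm : max i j ≤ size)
    (maxp : Int) :
    pvAKloop grid size n i j 0 [] maxp
      = (pvDiagMax grid N size i j maxp, size - max i j) := by
  have h0 : (((pvDList grid i j ((size - max i j).toNat)).take 0).drop (0 + 1 - N)) = [] := by simp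
  have := pvAKloop_eq grid size n i j N ((size - max i j).toNat) hn hN (by omega) ⟨hi, hj⟩ 0 maxp (by omega)
  rw [h0] at this
  rw [show (0:Int) = ((0:Nat):Int) from rfl, this]
  have hlen : (pvDList grid i j ((size - max i j).toNat)).length = (size - max i j).toNat := by
    simp [pvDList]
  rw [pvDiagMax, pvWinMax, hlen]
  refine Prod.ext ?_ (by simp; omega)
  norm_num

theorem pvAJloop_eq (grid : List (List Int)) (size n i : Int) (N : Nat)
    (hn : (N : Int) = n) (hN : 1 ≤ N) (hi : 0 ≤ i) (hisz : i < size)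
    (jn : Nat) (hjn : (jn : Int) < size) (maxp : Int) :
    pvAJloop grid size n i (jn : Int) maxp =
      ((if size - i < n then -1 else 0),
       (PySem.List.pyRange (jn : Int) (-1) (-1)).foldl (fun b j' => pvDiagMax grid N size i j' b) maxp) := by
  induction jn generalizing maxp with
  | zero =>
    rw [pvAJloop, dif_pos (by omega)]
    push_cast
    rw [pvAKloop_full grid size n i 0 N hn hN hi (by omega) (by omega) maxp]
    have hmax : max i (0 : Int) = i := by omega
    rw [PySem.List.pyRange_neg_one_cons (by omega), PySem.List.pyRange_neg_one_eq_nil (by omega)]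
    simp only [hmax, List.foldl_cons, List.foldl_nil]
    by_cases hc : size - i < n
    · rw [if_pos (by omega), if_pos hc]
      rw [pvAJloop, dif_neg (by omega)]
    · rw [if_neg (by omega)]
      rw [if_neg hc]
  | succ jn ih =>
    rw [pvAJloop, dif_pos (by omega)]
    push_cast
    rw [pvAKloop_full grid size n i ((jn : Int) + 1) N hn hN hi (by omega) (by omega) maxp]
    rw [PySem.List.pyRange_neg_one_cons (a := ((jn : Int) + 1)) (by omega)]
    simp only [List.foldl_cons]
    have harg : ((jn : Int) + 1) - 1 = (jn : Int) := by ring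
    by_cases hc : size - max i ((jn : Int) + 1) < n
    · rw [if_pos (by omega)]
      rw [harg, ih (by omega) _]
    · rw [if_neg (by omega), if_neg (by omega)]
      rw [harg, ih (by omega) _]

theorem pvAJloop_eq' (grid : List (List Int)) (size n i : Int) (N : Nat)
    (hn : (N : Int) = n) (hN : 1 ≤ N) (hi : 0 ≤ i) (hisz : i < size)
    (j : Int) (hj0 : 0 ≤ j) (hjn : j < size) (maxp : Int) :
    pvAJloop grid size n i j maxp =
      ((if size - i < n then -1 else 0),
       (PySem.List.pyRange j (-1) (-1)).foldl (fun b j' => pvDiagMax grid N size i j' b) maxp) := by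
  have := pvAJloop_eq grid size n i N hn hN hi hisz j.toNat (by omega) maxp
  rw [Int.toNat_of_nonneg hj0] at this
  exact this

theorem pvAIloop_neg (grid : List (List Int)) (size n i j maxp : Int) (hj : j < 0) :
    pvAIloop grid size n i j maxp = maxp := by
  induction hfuel : (size - i).toNat generalizing i with
  | zero => rw [pvAIloop, dif_neg (by omega)]
  | succ fuel ih =>
    by_cases hc : i < size
    · rw [pvAIloop, dif_pos hc]
      rw [pvAJloop, dif_neg (by omega)]
      exact ih (i + 1) (by omega)
    · rw [pvAIloop, dif_neg hc]

theorem pvAIloop_zero (grid : List (List Int)) (size n : Int) (N : Nat)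
    (hn : (N : Int) = n) (hN : 1 ≤ N) (iN : Nat) (hiN : 1 ≤ iN) (maxp : Int) :
    pvAIloop grid size n (iN : Int) 0 maxp =
      (PySem.List.pyRange (iN : Int) size 1).foldl (fun b i' => pvDiagMax grid N size i' 0 b) maxp := by
  induction hfuel : (size - (iN : Int)).toNat generalizing iN maxp with
  | zero =>
    rw [pvAIloop, dif_neg (by omega), PySem.List.pyRange_one_eq_nil (by omega), List.foldl_nil]
  | succ fuel ih =>
    have hlt : (iN : Int) < size := by omega
    rw [pvAIloop, dif_pos hlt]
    rw [pvAJloop_eq' grid size n (iN : Int) N hn hN (by omega) hlt 0 (by omega) (by omega) maxp]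
    rw [PySem.List.pyRange_neg_one_cons (by omega), PySem.List.pyRange_neg_one_eq_nil (by omega)]
    simp only [List.foldl_cons, List.foldl_nil]
    rw [PySem.List.pyRange_one_cons (by omega), List.foldl_cons]
    by_cases hc : size - (iN : Int) < n
    · rw [if_pos hc, pvAIloop_neg _ _ _ _ _ _ (by omega)]
      -- remaining diagonals are shorter than the window: the fold is the identity
      have hid : ∀ (acc x : Int), x ∈ PySem.List.pyRange ((iN : Int) + 1) size 1 →
          pvDiagMax grid N size x 0 acc = acc := by
        intro acc x hx
        have hb := PySem.List.mem_pyRange_one.mp hx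
        apply pvWinMax_small
        have : max x 0 = x := by omega
        simp only [pvDList, List.length_map, List.length_range]
        omega
      rw [PySem.List.foldl_congr_mem _ _ (fun b _ => b) _ hid, PySem.List.foldl_ignore]
    · rw [if_neg hc]
      rw [show ((iN : Int) + 1) = ((iN + 1 : Nat) : Int) by push_cast; ring]
      rw [ih (iN + 1) (by omega) _ (by omega)]

theorem pvA_eq_spec (grid : List (List Int)) (n : Int) (N : Nat)
    (hn : (N : Int) = n) (hN : 1 ≤ N) :
    pvAIloop grid ((grid.length : Int)) n 0 ((grid.length : Int) - 1) 0 =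
      (PySem.List.pyRange 1 (grid.length : Int) 1).foldl (fun b i' => pvDiagMax grid N (grid.length : Int) i' 0 b)
        ((PySem.List.pyRange ((grid.length : Int) - 1) (-1) (-1)).foldl
          (fun b j' => pvDiagMax grid N (grid.length : Int) 0 j' b) 0) := by
  set size := (grid.length : Int) with hsz
  rcases Nat.eq_zero_or_pos grid.length with hz | hpos
  · rw [pvAIloop, dif_neg (by omega)]
    rw [PySem.List.pyRange_neg_one_eq_nil (by omega), PySem.List.pyRange_one_eq_nil (by omega)]
    simp
  · have h1 : (0 : Int) < size := by omega
    rw [pvAIloop, dif_pos h1]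
    rw [pvAJloop_eq' grid size n 0 N hn hN (by omega) h1 (size - 1) (by omega) (by omega) 0]
    by_cases hc : size - 0 < n
    · rw [if_pos hc, pvAIloop_neg _ _ _ _ _ _ (by omega)]
      have hid : ∀ (acc x : Int), x ∈ PySem.List.pyRange 1 size 1 →
          pvDiagMax grid N size x 0 acc = acc := by
        intro acc x hx
        have hb := PySem.List.mem_pyRange_one.mp hx
        apply pvWinMax_small
        have : max x 0 = x := by omega
        simp only [pvDList, List.length_map, List.length_range]
        omega
      rw [PySem.List.foldl_congr_mem _ _ (fun b _ => b) _ hid, PySem.List.foldl_ignore]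
    · rw [if_neg hc]
      rw [show (0 : Int) + 1 = ((1 : Nat) : Int) by norm_num]
      rw [pvAIloop_zero grid size n N hn hN 1 (by omega) _]
      norm_num

theorem pvFloordivCancel (u x : Int) (h : u ≠ 0) : PySem.Int.floordiv (u * x) u = x := by
  rcases lt_trichotomy u 0 with h1 | h1 | h1
  · rw [show u * x = -((-u) * x) by ring, show u = -(-u) by ring, PySem.Int.floordiv_neg_neg,
      PySem.Int.floordiv_eq_iff_of_pos (by omega)]
    constructor <;> nlinarith
  · omega
  · rw [PySem.Int.floordiv_eq_iff_of_pos h1]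
    constructor <;> nlinarith

theorem pvIfCount (w : List Int) :
    (if 0 < ((w.count 0 : Nat) : Int) then 0 else (w.filter (fun x => x != 0)).prod)
      = pvWinProd w := by
  by_cases h : 0 ∈ w
  · rw [if_pos (by exact_mod_cast List.count_pos_iff.mpr h), pvWinProd, if_pos h]
  · have hc : w.count 0 = 0 := List.count_eq_zero.mpr h
    rw [if_neg (by simp [hc]), pvWinProd, if_neg h]
    rw [List.filter_eq_self.mpr]
    intro a ha
    simp only [bne_iff_ne, ne_eq]
    intro heq
    exact h (heq ▸ ha)

theorem pvIfMem (w : List Int) :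
    (if 0 ∈ w then 0 else (w.filter (fun x => x != 0)).prod) = pvWinProd w := by
  by_cases h : 0 ∈ w
  · rw [if_pos h, pvWinProd, if_pos h]
  · rw [if_neg h, pvWinProd, if_neg h]
    rw [List.filter_eq_self.mpr]
    intro a ha
    simp only [bne_iff_ne, ne_eq]
    intro heq
    exact h (heq ▸ ha)

theorem pvBBody_inv (grid : List (List Int)) (n si sj : Int) (N L : Nat)
    (hn : (N : Int) = n) (hN : 1 ≤ N) (b0 : Int) (t : Nat) (ht : t ≤ L) :
    (List.range t).foldl (fun st (k : Nat) => pvBBody grid n si sj st (k : Int)) (1, 0, b0)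
      = (((((pvDList grid si sj L).take t).drop (t - N)).filter (fun x => x != 0)).prod,
         (((((pvDList grid si sj L).take t).drop (t - N)).count 0 : Nat) : Int),
         ((List.range' 1 t).filter (fun e => N ≤ e)).foldl (pvWinStep (pvDList grid si sj L) N) b0) := by
  set d := pvDList grid si sj L with hd
  have hlen : d.length = L := by simp [hd, pvDList]
  induction t with
  | zero => simp
  | succ t iht =>
    have htL : t < L := by omega
    rw [List.range_succ, List.foldl_append, iht (by omega)]
    simp only [List.foldl_cons, List.foldl_nil]
    have hv : PySem.List.pyGetD (PySem.List.pyGetD grid (si + (t : Int)) []) (sj + (t : Int)) 0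
        = d[t]'(by omega) := by
      simp only [hd, pvDList, List.getElem_map, List.getElem_range]
      rfl
    have happ : (d.take t).drop (t - N) ++ [d[t]'(by omega)] = (d.take (t + 1)).drop (t - N) := by
      rw [← pvTakeSucc _ _ (by omega), List.drop_append_of_le_length (by simp; omega)]
    simp only [pvBBody, hv]
    have hw1 : (if d[t]'(by omega) = 0 then
          ((((d.take t).drop (t - N)).filter (fun x => x != 0)).prod,
           ((((d.take t).drop (t - N)).count 0 : Nat) : Int) + 1)
        else ((((d.take t).drop (t - N)).filter (fun x => x != 0)).prod * d[t]'(by omega),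
           ((((d.take t).drop (t - N)).count 0 : Nat) : Int)))
        = ((((d.take (t + 1)).drop (t - N)).filter (fun x => x != 0)).prod,
           ((((d.take (t + 1)).drop (t - N)).count 0 : Nat) : Int)) := by
      rw [← happ]
      by_cases hA : d[t]'(by omega) = 0
      · rw [if_pos hA, hA]
        simp [List.filter_append, List.count_append]
      · rw [if_neg hA]
        simp [List.filter_append, List.count_append, hA]
    rw [hw1]
    have hrange : List.range' 1 (t + 1) = List.range' 1 t ++ [t + 1] := by
      have := List.range'_concat (s := 1) (n := t) (step := 1)
      simpa [Nat.add_comm] using this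
    rcases Nat.lt_or_ge t N with hpop | hpop
    · -- window not yet full: nothing leaves
      have hnle : ¬ n ≤ (t : Int) := by omega
      rw [if_neg hnle]
      have hidx : t - N = t + 1 - N := by omega
      rw [hidx, hrange, List.filter_append, List.foldl_append]
      by_cases hb : N ≤ t + 1
      · have hsing : List.filter (fun e => decide (N ≤ e)) [t + 1] = [t + 1] := by simp [hb]
        rw [hsing, List.foldl_cons, List.foldl_nil, if_pos (show n - 1 ≤ (t : Int) by omega)]
        rw [pvWinStep, pvIfCount]
      · have hsing : List.filter (fun e => decide (N ≤ e)) [t + 1] = [] := by simp; omega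
        rw [hsing, List.foldl_nil, if_neg (show ¬ n - 1 ≤ (t : Int) by omega)]
    · -- an element leaves the window
      have hnle : n ≤ (t : Int) := by omega
      rw [if_pos hnle]
      have h1 : si + (t : Int) - n = si + ((t - N : Nat) : Int) := by omega
      have h2 : sj + (t : Int) - n = sj + ((t - N : Nat) : Int) := by omega
      have hu : PySem.List.pyGetD (PySem.List.pyGetD grid (si + (t : Int) - n) []) (sj + (t : Int) - n) 0
          = d[t - N]'(by omega) := by
        rw [h1, h2]
        simp only [hd, pvDList, List.getElem_map, List.getElem_range]
        rfl
      rw [hu]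
      have hcons : (d.take (t + 1)).drop (t - N)
          = d[t - N]'(by omega) :: (d.take (t + 1)).drop (t + 1 - N) := by
        rw [List.drop_eq_getElem_cons (l := d.take (t + 1)) (by simp [hlen]; omega)]
        congr 1
        · exact List.getElem_take
        · congr 1; omega
      rw [hcons]
      rw [hrange, List.filter_append, List.foldl_append]
      have hsing : List.filter (fun e => decide (N ≤ e)) [t + 1] = [t + 1] := by simp; omega
      rw [hsing, List.foldl_cons, List.foldl_nil, if_pos (show n - 1 ≤ (t : Int) by omega)]
      rw [pvWinStep]
      by_cases hu0 : d[t - N]'(by omega) = 0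
      · rw [if_pos hu0, hu0]
        simp only [List.filter_cons, List.count_cons]
        norm_num
        rw [pvIfMem]
      · rw [if_neg hu0]
        simp only [List.filter_cons, List.count_cons]
        have hfc : (d[t - N]'(by omega) != 0) = true := by simp [hu0]
        simp only [hfc, if_true, List.prod_cons]
        rw [pvFloordivCancel _ _ hu0]
        norm_num
        refine ⟨hu0, ?_⟩
        simp only [if_neg hu0, add_zero]
        rw [pvIfCount]

theorem pvBInner_eq (grid : List (List Int)) (n si sj : Int) (N L : Nat)
    (hn : (N : Int) = n) (hN : 1 ≤ N) (b0 : Int) (hlen : (L : Int) = PySem.List.len grid - max si sj) :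
    ((PySem.List.pyRange 0 ((PySem.List.len grid - max si sj)) 1).foldl (pvBBody grid n si sj) (1, 0, b0)).2.2
      = pvWinMax (pvDList grid si sj L) N b0 := by
  rw [← hlen, PySem.List.pyRange_one]
  have hmap : (List.range ((L : Int) - 0).toNat).map (fun (k : Nat) => (0 : Int) + (k : Int))
      = (List.range L).map (fun (k : Nat) => (k : Int)) := by
    simp
  rw [hmap, List.foldl_map]
  rw [pvBBody_inv grid n si sj N L hn hN b0 L (by omega)]
  have hdlen : (pvDList grid si sj L).length = L := by simp [pvDList]
  rw [pvWinMax, hdlen]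

theorem pvB_eq_spec (grid : List (List Int)) (n : Int) (N : Nat)
    (hn : (N : Int) = n) (hN : 1 ≤ N) :
    find_greatest_product_in_diags_l2r_alt grid n =
      (PySem.List.pyRange 1 (grid.length : Int) 1).foldl (fun b i' => pvDiagMax grid N (grid.length : Int) i' 0 b)
        ((PySem.List.pyRange ((grid.length : Int) - 1) (-1) (-1)).foldl
          (fun b j' => pvDiagMax grid N (grid.length : Int) 0 j' b) 0) := by
  rw [find_greatest_product_in_diags_l2r_alt]
  simp only [List.foldl_append, List.foldl_map, PySem.List.len_eq]
  set size := (grid.length : Int) with hsz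
  have hpart1 : ∀ b0 : Int,
      (PySem.List.pyRange (size - 1) (-1) (-1)).foldl
        (fun best j => ((PySem.List.pyRange 0 (size - max 0 j) 1).foldl (pvBBody grid n 0 j) (1, 0, best)).2.2) b0
      = (PySem.List.pyRange (size - 1) (-1) (-1)).foldl (fun b j' => pvDiagMax grid N size 0 j' b) b0 := by
    intro b0
    apply PySem.List.foldl_congr_mem
    intro acc x hx
    have hb := PySem.List.mem_pyRange_neg_one.mp hx
    rw [pvDiagMax, ← pvBInner_eq grid n 0 x N ((size - max 0 x).toNat) hn hN acc
      (by simp only [PySem.List.len_eq, ← hsz]; omega)]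
    simp only [PySem.List.len_eq, ← hsz]
  have hpart2 : ∀ b0 : Int,
      (PySem.List.pyRange 1 size 1).foldl
        (fun best i => ((PySem.List.pyRange 0 (size - max i 0) 1).foldl (pvBBody grid n i 0) (1, 0, best)).2.2) b0
      = (PySem.List.pyRange 1 size 1).foldl (fun b i' => pvDiagMax grid N size i' 0 b) b0 := by
    intro b0
    apply PySem.List.foldl_congr_mem
    intro acc x hx
    have hb := PySem.List.mem_pyRange_one.mp hx
    rw [pvDiagMax, ← pvBInner_eq grid n x 0 N ((size - max x 0).toNat) hn hN acc
      (by simp only [PySem.List.len_eq, ← hsz]; omega)]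
    simp only [PySem.List.len_eq, ← hsz]
  rw [hpart1, hpart2]

theorem pv_main (grid : List (List Int)) (n : Int) (hn1 : 1 ≤ n) :
    find_greatest_product_in_diags_l2r grid n = find_greatest_product_in_diags_l2r_alt grid n := by
  have hn : ((n.toNat : Nat) : Int) = n := by omega
  have hN : 1 ≤ n.toNat := by omega
  rw [find_greatest_product_in_diags_l2r]
  simp only [PySem.List.len_eq]
  rw [pvA_eq_spec grid n n.toNat hn hN, pvB_eq_spec grid n n.toNat hn hN]

-- ===== VERDICT (by name: the statement is the Claim_ definition above) =====
theorem find_greatest_product_in_diags_l2r_spec : Claim_equal_find_greatest_product_in_diags_l2r := by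
  intro grid n _ hpre
  unfold Spec_find_greatest_product_in_diags_l2r
  exact pv_main grid n hpre.1
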